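-- pv_equiv track=rewrite | github.com/kuimetra/python_labs | cryptography/vigenere_cipher/main.py | keys_to_text
-- ===== SOURCE A (Python) =====
-- def keys_to_text(text, keys):
--     key_text, i = '', 0
--     for char in text:
--         if char.isalpha():
--             if char.isupper():
--                 key_text += keys[i]
--             else:
--                 key_text += keys[i].lower()
--             i += 1
--         else:
--             key_text += char
--     return key_text
-- ===== SOURCE B (Python) =====
-- def keys_to_text(text, keys):
--     positions = [idx for idx, c in enumerate(text) if c.isalpha()]
--     result = list(text)
--     for j, pos in enumerate(positions):
--         result[pos] = keys[j] if text[pos].isupper() else keys[j].lower()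
--     return ''.join(result)
-- ===== Notes on version B (the rewrite author's own statement) =====
-- stated objective: alternative
-- what changed: Replaces the single interleaving pass with a running key counter by a two-phase index-table-and-scatter: first collect the alphabetic positions, then scatter the (case-adjusted) keys into a mutable list of the original characters and join.
import Mathlib
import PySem

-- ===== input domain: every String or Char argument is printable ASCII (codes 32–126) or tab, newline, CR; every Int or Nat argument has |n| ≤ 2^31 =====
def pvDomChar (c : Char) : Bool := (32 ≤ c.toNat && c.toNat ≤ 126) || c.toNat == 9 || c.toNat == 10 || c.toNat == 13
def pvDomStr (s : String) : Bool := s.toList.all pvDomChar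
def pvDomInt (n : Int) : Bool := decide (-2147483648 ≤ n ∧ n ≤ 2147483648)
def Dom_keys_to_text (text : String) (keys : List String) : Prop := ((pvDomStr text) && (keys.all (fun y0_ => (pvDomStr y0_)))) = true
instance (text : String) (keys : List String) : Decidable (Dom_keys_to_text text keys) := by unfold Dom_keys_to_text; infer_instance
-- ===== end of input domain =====

-- B replaces A's single interleaving pass (running key counter, string accumulator) by a two-phase
-- index-table-and-scatter decomposition; objective: alternative (same result, different structure).

-- ===== PORT A =====
-- A: one pass over text with a string accumulator and a running key index i.
def keys_to_text (text : String) (keys : List String) : String :=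
  let r := text.toList.foldl
    (fun (st : List Char × Nat) c =>
      if PySem.Chars.isalpha c then
        if PySem.Chars.isupper c then
          (st.1 ++ (PySem.List.pyGetD keys (st.2 : Int) "").toList, st.2 + 1)
        else
          (st.1 ++ PySem.Chars.lower (PySem.List.pyGetD keys (st.2 : Int) "").toList, st.2 + 1)
      else (st.1 ++ [c], st.2))
    ([], 0)
  String.ofList r.1

-- ===== PORT B =====
-- B: build the table of alphabetic positions, scatter case-adjusted keys into list(text), join.
def keys_to_text_alt (text : String) (keys : List String) : String :=
  let cs := text.toList
  let positions : List Int :=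
    ((PySem.List.enumerate cs).filter (fun p => PySem.Chars.isalpha p.2)).map (·.1)
  let base : List (List Char) := cs.map (fun c => [c])
  let result := (PySem.List.enumerate positions).foldl
    (fun r jp =>
      PySem.List.pySetD r jp.2
        (if PySem.Chars.isupper (PySem.List.pyGetD cs jp.2 ' ') then
           (PySem.List.pyGetD keys jp.1 "").toList
         else PySem.Chars.lower (PySem.List.pyGetD keys jp.1 "").toList))
    base
  String.ofList (PySem.Chars.join [] result)

-- ===== PRECONDITION & SPEC =====
-- Pre_ excludes exactly the inputs where Python A raises IndexError: more alphabetic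
-- characters in text than there are keys (Python B raises IndexError on the same inputs).
def Pre_keys_to_text (text : String) (keys : List String) : Prop :=
  text.toList.countP (fun c => PySem.Chars.isalpha c) ≤ keys.length
instance (text : String) (keys : List String) : Decidable (Pre_keys_to_text text keys) := by
  unfold Pre_keys_to_text; infer_instance

def pvWitness_keys_to_text : String × List String := ("Ab, c!", ["KE", "y", "Z"])

def Spec_keys_to_text (text : String) (keys : List String) (out : String) : Prop := out = keys_to_text_alt text keys
instance (text : String) (keys : List String) (out : String) : Decidable (Spec_keys_to_text text keys out) := by unfold Spec_keys_to_text; infer_instance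

-- ===== CLAIM (what is proved, stated in full; the proofs are below) =====
def Claim_equal_keys_to_text : Prop := ∀ (text : String) (keys : List String), Dom_keys_to_text text keys → Pre_keys_to_text text keys → Spec_keys_to_text text keys (keys_to_text text keys)

-- ===== LEMMAS AND PROOFS =====

lemma enum_shift {α : Type} (cs : List α) : ∀ (s : Int),
    PySem.List.enumerate cs s = (PySem.List.enumerate cs 0).map (fun p => (p.1 + s, p.2)) := by
  induction cs with
  | nil => intro s; simp [PySem.List.enumerate]
  | cons c cs ih =>
    intro s
    rw [PySem.List.enumerate_cons, PySem.List.enumerate_cons, ih (s+1), List.map_cons, ih (0+1),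
      List.map_map]
    simp only [zero_add]
    congr 1
    apply List.map_congr_left
    intro p _
    simp [Function.comp]
    omega

-- the table of alphabetic positions B builds
def positionsOf (cs : List Char) : List Int :=
  ((PySem.List.enumerate cs).filter (fun p => PySem.Chars.isalpha p.2)).map (·.1)

lemma positionsOf_cons (c : Char) (cs : List Char) :
    positionsOf (c :: cs) =
      (if PySem.Chars.isalpha c then [(0:Int)] else []) ++ (positionsOf cs).map (· + 1) := by
  simp only [positionsOf, PySem.List.enumerate_cons, List.filter_cons, zero_add]
  rw [enum_shift cs 1]
  by_cases h : PySem.Chars.isalpha c <;>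
    simp [h, List.filter_map, List.map_map, Function.comp_def]

lemma enumerate_map_int (g : Int → Int) (ps : List Int) : ∀ (s : Int),
    PySem.List.enumerate (ps.map g) s = (PySem.List.enumerate ps s).map (fun p => (p.1, g p.2)) := by
  induction ps with
  | nil => intro s; simp [PySem.List.enumerate]
  | cons p ps ih => intro s; simp [PySem.List.enumerate_cons, ih]

lemma mem_positionsOf_nonneg (cs : List Char) (p : Int) (hp : p ∈ positionsOf cs) : 0 ≤ p := by
  simp only [positionsOf, List.mem_map, List.mem_filter] at hp
  obtain ⟨⟨i, c⟩, ⟨hmem, _⟩, rfl⟩ := hp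
  have hi : i ∈ (PySem.List.enumerate cs 0).map (·.1) := List.mem_map_of_mem hmem
  rw [PySem.List.map_fst_enumerate, PySem.List.mem_pyRange_one] at hi
  exact hi.1

-- scattering at shifted (≥ 1) positions leaves the head of the list alone
lemma foldl_set_cons (w : Int → Int → List Char) (pairs : List (Int × Int)) :
    ∀ (x : List Char) (r : List (List Char)), (∀ p ∈ pairs, 0 ≤ p.2) →
    pairs.foldl (fun r jp => PySem.List.pySetD r (jp.2 + 1) (w jp.1 (jp.2 + 1))) (x :: r)
      = x :: pairs.foldl (fun r jp => PySem.List.pySetD r jp.2 (w jp.1 (jp.2 + 1))) r := by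
  induction pairs with
  | nil => intro x r _; simp
  | cons jp pairs ih =>
    intro x r h
    have h2 : (0:Int) ≤ jp.2 := (h jp (List.mem_cons_self ..))
    rw [List.foldl_cons, List.foldl_cons,
      PySem.List.pySetD_of_nonneg (x :: r) _ (by omega : (0:Int) ≤ jp.2 + 1),
      PySem.List.pySetD_of_nonneg r _ h2]
    have : (jp.2 + 1).toNat = jp.2.toNat + 1 := by omega
    rw [this, List.set_cons_succ]
    exact ih x _ (fun p hp => h p (List.mem_cons_of_mem _ hp))

-- the per-position pieces B's scatter produces, with abstract value function v (rank, position)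
def pieceAux (v : Int → Int → List Char) : List Char → Int → List (List Char)
  | [], _ => []
  | c :: cs, s =>
    (if PySem.Chars.isalpha c then v s 0 else [c]) ::
      pieceAux (fun a b => v a (b + 1)) cs (if PySem.Chars.isalpha c then s + 1 else s)

lemma snd_mem_of_mem_enumerate {α : Type} (xs : List α) (t : Int) (p : Int × α)
    (hp : p ∈ PySem.List.enumerate xs t) : p.2 ∈ xs := by
  rw [← PySem.List.map_snd_enumerate xs t]
  exact List.mem_map_of_mem hp

lemma scatter_pieces (cs : List Char) : ∀ (v : Int → Int → List Char) (s : Int),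
    (PySem.List.enumerate (positionsOf cs) s).foldl
        (fun r jp => PySem.List.pySetD r jp.2 (v jp.1 jp.2)) (cs.map (fun c => [c]))
      = pieceAux v cs s := by
  induction cs with
  | nil => intro v s; simp [positionsOf, PySem.List.enumerate, pieceAux]
  | cons c cs ih =>
    intro v s
    have hnn : ∀ (t : Int), ∀ p ∈ PySem.List.enumerate (positionsOf cs) t, (0:Int) ≤ p.2 :=
      fun t p hp => mem_positionsOf_nonneg cs p.2 (snd_mem_of_mem_enumerate _ t p hp)
    rw [positionsOf_cons]
    by_cases h : PySem.Chars.isalpha c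
    · simp only [h, if_true, List.singleton_append, List.map_cons]
      rw [PySem.List.enumerate_cons, List.foldl_cons,
        PySem.List.pySetD_of_nonneg _ _ (le_refl (0:Int))]
      simp only [Int.toNat_zero, List.set_cons_zero]
      rw [enumerate_map_int, List.foldl_map,
        foldl_set_cons v _ _ _ (hnn (s+1)), ih (fun a b => v a (b + 1)) (s + 1)]
      simp [pieceAux, h]
    · simp only [h, Bool.false_eq_true, if_false, List.nil_append, List.map_cons]
      rw [enumerate_map_int, List.foldl_map,
        foldl_set_cons v _ _ _ (hnn s), ih (fun a b => v a (b + 1)) s]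
      simp [pieceAux, h]

lemma join_nil_flatten (l : List (List Char)) : PySem.Chars.join [] l = l.flatten := by
  show [].intercalate l = l.flatten
  induction l with
  | nil => rfl
  | cons x l ih => simp [List.intercalate] at *; cases l <;> simp_all [List.intersperse]

-- the key piece written for alphabetic character c using key index idx
def keyPiece (keys : List String) (idx : Int) (c : Char) : List Char :=
  if PySem.Chars.isupper c then (PySem.List.pyGetD keys idx "").toList
  else PySem.Chars.lower (PySem.List.pyGetD keys idx "").toList

-- common specification of the output (as a list of chars), key counter idx
def specA (keys : List String) : List Char → Int → List Char
  | [], _ => []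
  | c :: cs, idx =>
    if PySem.Chars.isalpha c then keyPiece keys idx c ++ specA keys cs (idx + 1)
    else c :: specA keys cs idx

lemma pieceAux_eq_specA (keys : List String) (cs : List Char) :
    ∀ (v : Int → Int → List Char) (s : Int),
    (∀ (j : Int) (k : Nat), k < cs.length → v j (k : Int) = keyPiece keys j cs[k]!) →
    PySem.Chars.join [] (pieceAux v cs s) = specA keys cs s := by
  induction cs with
  | nil => intro v s _; simp [pieceAux, specA]
  | cons c cs ih =>
    intro v s hv
    have hvtail : ∀ (j : Int) (k : Nat), k < cs.length →
        (fun a b => v a (b + 1)) j (k : Int) = keyPiece keys j cs[k]! := by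
      intro j k hk
      have := hv j (k + 1) (by simpa using hk)
      push_cast at this
      simpa using this
    have hhead : v s 0 = keyPiece keys s c := by
      have := hv s 0 (by simp)
      simpa using this
    by_cases h : PySem.Chars.isalpha c
    · simp only [pieceAux, specA, h, if_true]
      rw [show PySem.Chars.join [] (v s 0 :: pieceAux (fun a b => v a (b + 1)) cs (s + 1))
            = v s 0 ++ PySem.Chars.join [] (pieceAux (fun a b => v a (b + 1)) cs (s + 1)) by
          simp [join_nil_flatten]]
      rw [ih _ (s + 1) hvtail, hhead]
    · simp only [pieceAux, specA, h, Bool.false_eq_true, if_false]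
      rw [show PySem.Chars.join [] ([c] :: pieceAux (fun a b => v a (b + 1)) cs s)
            = [c] ++ PySem.Chars.join [] (pieceAux (fun a b => v a (b + 1)) cs s) by
          simp [join_nil_flatten]]
      rw [ih _ s hvtail]
      rfl

lemma A_fold (keys : List String) (cs : List Char) : ∀ (acc : List Char) (i : Nat),
    cs.foldl
      (fun (st : List Char × Nat) c =>
        if PySem.Chars.isalpha c then
          if PySem.Chars.isupper c then
            (st.1 ++ (PySem.List.pyGetD keys (st.2 : Int) "").toList, st.2 + 1)
          else
            (st.1 ++ PySem.Chars.lower (PySem.List.pyGetD keys (st.2 : Int) "").toList, st.2 + 1)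
        else (st.1 ++ [c], st.2)) (acc, i)
      = (acc ++ specA keys cs (i : Int), i + cs.countP (fun c => PySem.Chars.isalpha c)) := by
  induction cs with
  | nil => intro acc i; simp [specA]
  | cons c cs ih =>
    intro acc i
    rw [List.foldl_cons, List.countP_cons]
    by_cases h : PySem.Chars.isalpha c
    · by_cases hu : PySem.Chars.isupper c <;>
      · simp only [h, hu, if_true, if_false, Bool.false_eq_true, ih _ (i + 1)]
        push_cast
        simp [specA, keyPiece, h, hu, List.append_assoc]
        omega
    · simp only [h, Bool.false_eq_true, if_false, ih _ i]
      simp [specA, h]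

-- ===== VERDICT (by name: the statement is the Claim_ definition above) =====
theorem keys_to_text_spec : Claim_equal_keys_to_text := by
  intro text keys _ _
  show keys_to_text text keys = keys_to_text_alt text keys
  unfold keys_to_text keys_to_text_alt
  set cs := text.toList with hcs
  rw [A_fold keys cs [] 0]
  have hs : (PySem.List.enumerate (positionsOf cs)).foldl
      (fun r jp => PySem.List.pySetD r jp.2
        ((fun (j p : Int) =>
          if PySem.Chars.isupper (PySem.List.pyGetD cs p ' ') then
            (PySem.List.pyGetD keys j "").toList
          else PySem.Chars.lower (PySem.List.pyGetD keys j "").toList) jp.1 jp.2))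
      (cs.map (fun c => [c]))
      = pieceAux (fun (j p : Int) =>
          if PySem.Chars.isupper (PySem.List.pyGetD cs p ' ') then
            (PySem.List.pyGetD keys j "").toList
          else PySem.Chars.lower (PySem.List.pyGetD keys j "").toList) cs 0 :=
    scatter_pieces cs (fun (j p : Int) =>
          if PySem.Chars.isupper (PySem.List.pyGetD cs p ' ') then
            (PySem.List.pyGetD keys j "").toList
          else PySem.Chars.lower (PySem.List.pyGetD keys j "").toList) 0
  simp only [] at hs ⊢
  rw [show ((PySem.List.enumerate cs).filter (fun p => PySem.Chars.isalpha p.2)).map (·.1)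
        = positionsOf cs from rfl]
  rw [hs]
  rw [pieceAux_eq_specA keys cs _ 0 ?_]
  · simp
  · intro j k hk
    have h1 : PySem.List.pyGetD cs (k : Int) ' ' = cs[k]! := by
      rw [PySem.List.pyGetD_natCast, List.getD_eq_getElem _ _ hk, getElem!_pos cs k hk]
    simp only [h1, keyPiece]
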